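-- pv_equiv track=rewrite | github.com/Imjaeseokk/Ajou_SystemOptimization | AssignmentScheduling_reteat.py | calTotalCompleteTime
-- ===== SOURCE A (Python) =====
-- def calTotalCompleteTime(schedule):
--     readyTime = []
--     completeTime = []
--     for i in range(len(schedule)):
--         if i == 0:
--             readyTime.append(0)
--             completeTime.append(schedule[i])
--             continue
--         readyTime.append(readyTime[i-1]+schedule[i-1])
--         completeTime.append(readyTime[i]+schedule[i])
--     return sum(completeTime)
-- ===== SOURCE B (Python) =====
-- def calTotalCompleteTime(schedule):
--     n = len(schedule)
--     return sum((n - i) * t for i, t in enumerate(schedule))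
-- ===== Notes on version B (the rewrite author's own statement) =====
-- stated objective: simpler
-- what changed: Replaces the readyTime/completeTime array construction and prefix accumulation with a direct one-pass weighted sum: job i contributes (n-i)*schedule[i] to the total.
import Mathlib
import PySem

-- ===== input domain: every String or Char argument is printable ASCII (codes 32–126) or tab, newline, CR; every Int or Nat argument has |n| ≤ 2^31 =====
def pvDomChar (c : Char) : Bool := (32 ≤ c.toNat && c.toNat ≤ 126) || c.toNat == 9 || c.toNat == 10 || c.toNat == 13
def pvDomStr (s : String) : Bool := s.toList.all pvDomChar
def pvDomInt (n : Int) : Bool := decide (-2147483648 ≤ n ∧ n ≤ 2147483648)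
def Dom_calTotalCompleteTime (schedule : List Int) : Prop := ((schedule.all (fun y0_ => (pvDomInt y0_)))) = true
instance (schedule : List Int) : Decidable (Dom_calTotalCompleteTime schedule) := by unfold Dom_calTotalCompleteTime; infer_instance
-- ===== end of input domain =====

-- B replaces A's readyTime/completeTime array bookkeeping by a direct weighted sum Σ (n-i)*schedule[i] (simpler, same O(n)).


-- ===== PORT A =====
-- literal port: builds readyTime and completeTime lists by appending, indexing with pyGetD
-- (all indices are in range on every input, so the default is never used; A is total)
def calTotalCompleteTime (schedule : List Int) : Int :=
  let st := (PySem.List.pyRange 0 schedule.length 1).foldl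
    (fun (st : List Int × List Int) i =>
      if i == 0 then
        (st.1 ++ [0], st.2 ++ [PySem.List.pyGetD schedule i 0])
      else
        let rt' := st.1 ++ [PySem.List.pyGetD st.1 (i - 1) 0 + PySem.List.pyGetD schedule (i - 1) 0]
        (rt', st.2 ++ [PySem.List.pyGetD rt' i 0 + PySem.List.pyGetD schedule i 0]))
    ([], [])
  st.2.sum

-- ===== PORT B =====
def calTotalCompleteTime_alt (schedule : List Int) : Int :=
  let n : Int := schedule.length
  ((PySem.List.enumerate schedule 0).map (fun p => (n - p.1) * p.2)).sum

-- ===== PRECONDITION & SPEC =====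
def Spec_calTotalCompleteTime (schedule : List Int) (out : Int) : Prop := out = calTotalCompleteTime_alt schedule
instance (schedule : List Int) (out : Int) : Decidable (Spec_calTotalCompleteTime schedule out) := by unfold Spec_calTotalCompleteTime; infer_instance

-- ===== CLAIM (what is proved, stated in full; the proofs are below) =====
def Claim_equal_calTotalCompleteTime : Prop := ∀ (schedule : List Int), Dom_calTotalCompleteTime schedule → Spec_calTotalCompleteTime schedule (calTotalCompleteTime schedule)

-- ===== LEMMAS AND PROOFS =====

/-- prefix sum of the first `j` elements -/
def pvP (s : List Int) (j : Nat) : Int := (s.take j).sum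

theorem pvP_succ (s : List Int) (j : Nat) (h : j < s.length) :
    pvP s (j + 1) = pvP s j + s[j] := by
  simp [pvP, List.sum_take_succ s j h]

/-- A's loop invariant: after processing range(k), the two lists are the prefix sums. -/
theorem pvA_loop (s : List Int) (k : Nat) (hk : k ≤ s.length) :
    (PySem.List.pyRange 0 k 1).foldl
      (fun (st : List Int × List Int) i =>
        if i == 0 then
          (st.1 ++ [0], st.2 ++ [PySem.List.pyGetD s i 0])
        else
          let rt' := st.1 ++ [PySem.List.pyGetD st.1 (i - 1) 0 + PySem.List.pyGetD s (i - 1) 0]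
          (rt', st.2 ++ [PySem.List.pyGetD rt' i 0 + PySem.List.pyGetD s i 0]))
      ([], [])
    = ((List.range k).map (pvP s), (List.range k).map (fun j => pvP s (j + 1))) := by
  induction k with
  | zero => simp
  | succ k ih =>
    have hk' : k ≤ s.length := by omega
    have hks : k < s.length := by omega
    have hsplit : PySem.List.pyRange 0 ((k : Int) + 1) 1
        = PySem.List.pyRange 0 (k : Int) 1 ++ [(k : Int)] :=
      PySem.List.pyRange_one_succ_right (by exact_mod_cast Nat.zero_le k)
    have hcast : ((k + 1 : Nat) : Int) = (k : Int) + 1 := by push_cast; ring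
    rw [show ((k + 1 : Nat) : Int) = (k : Int) + 1 from hcast] at *
    rw [hsplit, List.foldl_append, ih hk']
    by_cases h0 : k = 0
    · subst h0
      have hlen : 0 < s.length := hks
      simp only [List.foldl_cons, List.foldl_nil]
      have : PySem.List.pyGetD s (0 : Int) 0 = s[0] := by
        simpa using PySem.List.pyGetD_ofNat (n := 0) hks (d := 0) (xs := s)
      simp [this, pvP, List.range_succ, List.take_one]
      rcases s with _ | ⟨a, t⟩
      · simp at hlen
      · simp
    · have hne : ((k : Int) == 0) = false := by
        simp; omega
      simp only [List.foldl_cons, List.foldl_nil, hne, Bool.false_eq_true, if_false]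
      have hrt : PySem.List.pyGetD ((List.range k).map (pvP s)) ((k : Int) - 1) 0
          = pvP s (k - 1) := by
        have : ((k : Int) - 1) = ((k - 1 : Nat) : Int) := by omega
        rw [this, PySem.List.pyGetD_natCast]
        rw [List.getD_eq_getElem?_getD]
        simp [List.getElem?_map, List.getElem?_range (show k - 1 < k by omega)]
      have hs1 : PySem.List.pyGetD s ((k : Int) - 1) 0 = s[k - 1] := by
        have : ((k : Int) - 1) = ((k - 1 : Nat) : Int) := by omega
        rw [this]
        simpa using PySem.List.pyGetD_ofNat (n := k - 1) (by omega) (d := 0) (xs := s)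
      have hstep : pvP s (k - 1) + s[k - 1] = pvP s k := by
        have := pvP_succ s (k - 1) (by omega)
        have hkk : k - 1 + 1 = k := by omega
        rw [hkk] at this; omega
      have hrt' : (List.range k).map (pvP s) ++ [pvP s (k - 1) + s[k - 1]]
          = (List.range (k + 1)).map (pvP s) := by
        rw [hstep, List.range_succ]; simp
      have hrtk : PySem.List.pyGetD ((List.range (k + 1)).map (pvP s)) (k : Int) 0
          = pvP s k := by
        rw [PySem.List.pyGetD_natCast, List.getD_eq_getElem?_getD]
        simp
      have hsk : PySem.List.pyGetD s (k : Int) 0 = s[k] := by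
        simpa using PySem.List.pyGetD_ofNat (n := k) hks (d := 0) (xs := s)
      simp only [hrt, hs1, hrt', hrtk, hsk]
      rw [show pvP s k + s[k] = pvP s (k + 1) from (pvP_succ s k hks).symm]
      rw [List.range_succ]
      simp

/-- the sum of completion times equals B's weighted sum -/
theorem pvSum_eq (s : List Int) :
    ((List.range s.length).map (fun j => pvP s (j + 1))).sum
      = ((PySem.List.enumerate s 0).map
          (fun p => ((s.length : Int) - p.1) * p.2)).sum := by
  induction s using List.reverseRecOn with
  | nil => simp [PySem.List.enumerate_nil]
  | append_singleton s x ih =>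
    have hP : ∀ j < s.length, pvP (s ++ [x]) (j + 1) = pvP s (j + 1) := by
      intro j hj
      simp [pvP, List.take_append_of_le_length (by omega : j + 1 ≤ s.length)]
    have hPlast : pvP (s ++ [x]) (s.length + 1) = s.sum + x := by
      simp [pvP, List.take_of_length_le (by simp : (s ++ [x]).length ≤ s.length + 1)]
    rw [List.length_append, List.length_singleton, List.range_succ]
    rw [List.map_append, List.sum_append]
    have hmap : (List.range s.length).map (fun j => pvP (s ++ [x]) (j + 1))
        = (List.range s.length).map (fun j => pvP s (j + 1)) := by
      apply List.map_congr_left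
      intro j hj
      exact hP j (List.mem_range.mp hj)
    rw [hmap, ih]
    simp only [List.map_cons, List.map_nil, List.sum_cons, List.sum_nil, hPlast]
    rw [PySem.List.enumerate_append]
    simp only [List.map_append, List.sum_append, PySem.List.enumerate_cons,
      PySem.List.enumerate_nil, List.map_cons, List.map_nil, List.sum_cons, List.sum_nil]
    push_cast
    have hdist : ((PySem.List.enumerate s 0).map
          (fun p => ((s.length : Int) + 1 - p.1) * p.2)).sum
        = ((PySem.List.enumerate s 0).map
            (fun p => ((s.length : Int) - p.1) * p.2)).sum
          + ((PySem.List.enumerate s 0).map (fun p => p.2)).sum := by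
      rw [← List.sum_map_add]
      apply congrArg
      apply List.map_congr_left
      intro p _
      ring
    have hsnd : ((PySem.List.enumerate s 0).map (fun p => p.2)).sum = s.sum := by
      rw [PySem.List.map_snd_enumerate]
    rw [hdist, hsnd]
    ring

-- ===== VERDICT (by name: the statement is the Claim_ definition above) =====
theorem calTotalCompleteTime_spec : Claim_equal_calTotalCompleteTime := by
  intro s _
  unfold Spec_calTotalCompleteTime calTotalCompleteTime calTotalCompleteTime_alt
  simp only []
  rw [pvA_loop s s.length le_rfl]
  exact pvSum_eq s
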